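-- pv_equiv track=rewrite | github.com/bluethestyle/aws_ple_for_financial | core/pipeline/runner.py | _longest_contiguous_run
-- ===== SOURCE A (Python) =====
-- from typing import Any, Callable, Dict, List, Optional, Tuple, TYPE_CHECKING
--
-- def _longest_contiguous_run(
--     positions: List[int],
-- ) -> Optional[Tuple[int, int]]:
--     """Return ``(start, end)`` of the longest contiguous run in *positions*.
--
--     Positions are expected to be a sorted list of integer column indices.
--     The returned range is a half-open interval ``[start, end)`` such that
--     ``end - start`` columns are covered. Ties on length pick the earliest
--     run.  Returns ``None`` on empty input.
--     """
--     if not positions: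
--         return None
--     sorted_pos = sorted(set(positions))
--     best_start = sorted_pos[0]
--     best_end = sorted_pos[0] + 1
--     cur_start = sorted_pos[0]
--     cur_end = sorted_pos[0] + 1
--     for p in sorted_pos[1:]:
--         if p == cur_end:
--             cur_end = p + 1
--         else:
--             if cur_end - cur_start > best_end - best_start:
--                 best_start, best_end = cur_start, cur_end
--             cur_start, cur_end = p, p + 1
--     if cur_end - cur_start > best_end - best_start:
--         best_start, best_end = cur_start, cur_end
--     return best_start, best_end
-- ===== SOURCE B (Python) =====
-- from typing import List, Optional, Tuple
--
-- def _longest_contiguous_run(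
--     positions: List[int],
-- ) -> Optional[Tuple[int, int]]:
--     """Set-based scan: only run starts (x with x-1 absent) are extended."""
--     s = set(positions)
--     if not s:
--         return None
--     best_start = None
--     best_len = 0
--     for x in s:
--         if x - 1 in s:
--             continue
--         n = 1
--         y = x + 1
--         while y in s:
--             n += 1
--             y += 1
--         if best_start is None or n > best_len or (n == best_len and x < best_start):
--             best_start, best_len = x, n
--     return best_start, best_start + best_len
-- ===== Notes on version B (the rewrite author's own statement) =====
-- stated objective: alternative
-- what changed: Replaces sort-then-linear-scan over the deduplicated positions with the classic hash-set longest-consecutive-sequence algorithm: build a set, extend a run only from elements x with x-1 absent, keeping the best (longest, then smallest start).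
import Mathlib
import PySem

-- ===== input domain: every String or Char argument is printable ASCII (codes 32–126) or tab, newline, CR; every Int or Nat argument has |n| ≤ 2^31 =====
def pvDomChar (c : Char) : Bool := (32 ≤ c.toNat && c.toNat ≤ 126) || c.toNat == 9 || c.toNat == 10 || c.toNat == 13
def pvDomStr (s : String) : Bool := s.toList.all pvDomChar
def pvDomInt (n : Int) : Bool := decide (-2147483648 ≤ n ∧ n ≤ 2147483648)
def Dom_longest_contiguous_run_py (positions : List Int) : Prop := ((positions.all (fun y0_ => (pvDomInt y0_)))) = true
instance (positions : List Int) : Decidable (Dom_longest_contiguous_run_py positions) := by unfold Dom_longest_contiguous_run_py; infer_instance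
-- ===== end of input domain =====

-- B replaces A's sort-then-scan with the hash-set longest-consecutive-run algorithm
-- (extend runs only from starts x with x-1 absent): a different algorithm, same exact output.


-- ===== PORT A =====
-- loop body of A's for-loop over sorted_pos[1:], state (best_start, best_end, cur_start, cur_end)
def lcrAStep (st : Int × Int × Int × Int) (p : Int) : Int × Int × Int × Int :=
  if p = st.2.2.2 then (st.1, st.2.1, st.2.2.1, p + 1)
  else if st.2.2.2 - st.2.2.1 > st.2.1 - st.1 then (st.2.2.1, st.2.2.2, p, p + 1)
  else (st.1, st.2.1, p, p + 1)

-- A's final comparison after the loop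
def lcrAFinish (st : Int × Int × Int × Int) : Int × Int :=
  if st.2.2.2 - st.2.2.1 > st.2.1 - st.1 then (st.2.2.1, st.2.2.2) else (st.1, st.2.1)

def longest_contiguous_run_py (positions : List Int) : Option (Int × Int) :=
  if positions = [] then none
  else
    match PySem.List.sorted (PySem.Set.ofList positions) (fun x => x) false with
    | [] => none   -- unreachable: sorted(set(positions)) is nonempty here
    | h :: t => some (lcrAFinish (t.foldl lcrAStep (h, h + 1, h, h + 1)))

-- ===== PORT B =====
-- termination helper for lcrCount (cited by its decreasing_by)
lemma lcr_filter_length_lt (s : List Int) (y : Int) (hy : y ∈ s) :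
    (s.filter (fun z => decide (y + 1 ≤ z))).length <
      (s.filter (fun z => decide (y ≤ z))).length := by
  induction s with
  | nil => cases hy
  | cons a t ih =>
    have hmono : ∀ (u : List Int),
        (u.filter (fun z => decide (y + 1 ≤ z))).length ≤
          (u.filter (fun z => decide (y ≤ z))).length := by
      intro u
      induction u with
      | nil => simp
      | cons b v ihv =>
        simp only [List.filter_cons, decide_eq_true_eq]
        split <;> split <;> (try simp only [List.length_cons]) <;> omega
    rcases List.mem_cons.1 hy with h | h
    · subst h
      simp only [List.filter_cons, decide_eq_true_eq]
      rw [if_neg (by omega : ¬ (y + 1 ≤ y)), if_pos (le_refl y)]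
      simp only [List.length_cons]
      have := hmono t
      omega
    · have := ih h
      simp only [List.filter_cons, decide_eq_true_eq]
      split <;> split <;> (try simp only [List.length_cons]) <;> omega

-- B's inner while loop: count how many consecutive integers starting at y are in s
def lcrCount (s : List Int) (y : Int) : Nat :=
  if y ∈ s then 1 + lcrCount s (y + 1) else 0
termination_by (s.filter (fun z => decide (y ≤ z))).length
decreasing_by
  rename_i hy
  exact lcr_filter_length_lt s y hy

-- B's loop body over the set: skip non-starts, else compare (length, start)
def lcrStep (s : List Int) (best : Option (Int × Int)) (x : Int) : Option (Int × Int) :=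
  if (x - 1) ∈ s then best
  else
    let n : Int := 1 + (lcrCount s (x + 1) : Int)
    match best with
    | none => some (x, n)
    | some (bs, bl) => if n > bl ∨ (n = bl ∧ x < bs) then some (x, n) else some (bs, bl)

def longest_contiguous_run_py_alt (positions : List Int) : Option (Int × Int) :=
  let s : PySem.Set Int := PySem.Set.ofList positions
  if s = [] then none
  else
    match s.foldl (lcrStep s) none with
    | none => none   -- unreachable: a nonempty set has a run start
    | some (bs, bl) => some (bs, bs + bl)

-- ===== PRECONDITION & SPEC =====
def Spec_longest_contiguous_run_py (positions : List Int) (out : Option (Int × Int)) : Prop := out = longest_contiguous_run_py_alt positions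
instance (positions : List Int) (out : Option (Int × Int)) : Decidable (Spec_longest_contiguous_run_py positions out) := by unfold Spec_longest_contiguous_run_py; infer_instance

-- ===== CLAIM (what is proved, stated in full; the proofs are below) =====
def Claim_equal_longest_contiguous_run_py : Prop := ∀ (positions : List Int), Dom_longest_contiguous_run_py positions → Spec_longest_contiguous_run_py positions (longest_contiguous_run_py positions)

-- ===== LEMMAS AND PROOFS =====

-- run length from x, as the Python programs measure it (x assumed present)
def lcrLen (s : List Int) (x : Int) : Int := 1 + (lcrCount s (x + 1) : Int)

-- x is the start of a run of s
def lcrIsStart (s : List Int) (x : Int) : Prop := x ∈ s ∧ x - 1 ∉ s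

-- b is the start of the longest run, earliest on ties
def lcrGood (s : List Int) (b : Int) : Prop :=
  lcrIsStart s b ∧ ∀ x, lcrIsStart s x →
    (lcrLen s x < lcrLen s b ∨ (lcrLen s x = lcrLen s b ∧ b ≤ x))

lemma lcrGood_unique (s : List Int) (b b' : Int) (h : lcrGood s b) (h' : lcrGood s b') : b = b' := by
  rcases h with ⟨hb, hall⟩
  rcases h' with ⟨hb', hall'⟩
  have h1 := hall b' hb'
  have h2 := hall' b hb
  omega

lemma lcrCount_run (s : List Int) : ∀ (n : Nat) (y : Int),
    (∀ k : Nat, k < n → y + k ∈ s) → (y + n) ∉ s → lcrCount s y = n := by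
  intro n
  induction n with
  | zero =>
    intro y _ hno
    rw [lcrCount, if_neg (by simpa using hno)]
  | succ n ih =>
    intro y hall hno
    have hy : y ∈ s := by simpa using hall 0 (by omega)
    have h1 : ∀ k : Nat, k < n → y + 1 + (k : Int) ∈ s := fun k hk => by
      have h := hall (k + 1) (by omega)
      have e : y + ((k + 1 : Nat) : Int) = y + 1 + (k : Int) := by push_cast; ring
      rwa [e] at h
    have h2 : y + 1 + (n : Int) ∉ s := by
      have e : y + ((n + 1 : Nat) : Int) = y + 1 + (n : Int) := by push_cast; ring
      rwa [e] at hno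
    rw [lcrCount, if_pos hy, ih (y + 1) h1 h2]
    omega

lemma lcrLen_run (s : List Int) (cs ce : Int)
    (h1 : ∀ k : Int, cs ≤ k → k < ce → k ∈ s) (h2 : ce ∉ s) (h3 : cs < ce) :
    lcrLen s cs = ce - cs := by
  have hn : ((ce - cs - 1).toNat : Int) = ce - cs - 1 := by omega
  have := lcrCount_run s (ce - cs - 1).toNat (cs + 1)
    (fun k hk => h1 (cs + 1 + k) (by omega) (by omega))
    (by
      have : cs + 1 + ((ce - cs - 1).toNat : Int) = ce := by omega
      rw [this]; exact h2)
  unfold lcrLen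
  rw [this]
  omega

lemma exists_start (s : List Int) (hne : s ≠ []) : ∃ x, lcrIsStart s x := by
  cases h : s.min? with
  | none => exact absurd (List.min?_eq_none_iff.mp h) hne
  | some m =>
    obtain ⟨hm, hle⟩ := List.min?_eq_some_iff.mp h
    exact ⟨m, hm, fun hc => by have := hle _ hc; omega⟩

-- invariant of B's fold: acc is the best (longest, then smallest) start seen so far
def lcrInvB (s seen : List Int) (acc : Option (Int × Int)) : Prop :=
  match acc with
  | none => ∀ x ∈ seen, ¬ lcrIsStart s x
  | some (b, bl) => lcrIsStart s b ∧ b ∈ seen ∧ bl = lcrLen s b ∧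
      ∀ x ∈ seen, lcrIsStart s x →
        (lcrLen s x < lcrLen s b ∨ (lcrLen s x = lcrLen s b ∧ b ≤ x))

lemma stepB_preserve (s seen : List Int) (acc : Option (Int × Int)) (x : Int)
    (hx : x ∈ s) (h : lcrInvB s seen acc) : lcrInvB s (seen ++ [x]) (lcrStep s acc x) := by
  by_cases hx1 : (x - 1) ∈ s
  · have hstep : lcrStep s acc x = acc := by unfold lcrStep; rw [if_pos hx1]
    rw [hstep]
    cases acc with
    | none =>
      simp only [lcrInvB] at h ⊢
      intro y hy
      rcases List.mem_append.1 hy with h' | h'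
      · exact h y h'
      · have : y = x := by simpa using h'
        subst this
        exact fun hst => hst.2 hx1
    | some p =>
      obtain ⟨b, bl⟩ := p
      simp only [lcrInvB] at h ⊢
      refine ⟨h.1, List.mem_append_left _ h.2.1, h.2.2.1, fun y hy hst => ?_⟩
      rcases List.mem_append.1 hy with h' | h'
      · exact h.2.2.2 y h' hst
      · have : y = x := by simpa using h'
        subst this
        exact absurd hx1 hst.2
  · have hstart : lcrIsStart s x := ⟨hx, hx1⟩
    cases acc with
    | none =>
      have hstep : lcrStep s none x = some (x, 1 + (lcrCount s (x + 1) : Int)) := by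
        unfold lcrStep; rw [if_neg hx1]
      rw [hstep]
      simp only [lcrInvB] at h ⊢
      refine ⟨hstart, by simp, rfl, fun y hy hst => ?_⟩
      rcases List.mem_append.1 hy with h' | h'
      · exact absurd hst (h y h')
      · have : y = x := by simpa using h'
        subst this
        exact Or.inr ⟨rfl, le_refl _⟩
    | some p =>
      obtain ⟨b, bl⟩ := p
      simp only [lcrInvB] at h
      obtain ⟨hbst, hbmem, hbl, hdom⟩ := h
      have hstep : lcrStep s (some (b, bl)) x =
          if (1 + (lcrCount s (x + 1) : Int)) > bl ∨
             ((1 + (lcrCount s (x + 1) : Int)) = bl ∧ x < b)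
          then some (x, 1 + (lcrCount s (x + 1) : Int)) else some (b, bl) := by
        unfold lcrStep; rw [if_neg hx1]
      rw [hstep]
      have hnl : (1 + (lcrCount s (x + 1) : Int)) = lcrLen s x := rfl
      split_ifs with hc
      · simp only [lcrInvB]
        refine ⟨hstart, List.mem_append_right _ (by simp), hnl, fun y hy hst => ?_⟩
        rcases List.mem_append.1 hy with h' | h'
        · have hd := hdom y h' hst
          rw [hnl] at hc
          omega
        · have : y = x := by simpa using h'
          subst this
          exact Or.inr ⟨rfl, le_refl _⟩
      · simp only [lcrInvB]
        refine ⟨hbst, List.mem_append_left _ hbmem, hbl, fun y hy hst => ?_⟩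
        rcases List.mem_append.1 hy with h' | h'
        · exact hdom y h' hst
        · have : y = x := by simpa using h'
          subst this
          rw [hnl] at hc
          omega

lemma foldB_inv (s : List Int) : ∀ (l seen : List Int) (acc : Option (Int × Int)),
    (∀ x ∈ l, x ∈ s) → lcrInvB s seen acc →
    lcrInvB s (seen ++ l) (l.foldl (lcrStep s) acc) := by
  intro l
  induction l with
  | nil => intro seen acc _ h; simpa using h
  | cons x l ih =>
    intro seen acc hl h
    have hx : x ∈ s := hl x List.mem_cons_self
    have h' := stepB_preserve s seen acc x hx h
    have := ih (seen ++ [x]) (lcrStep s acc x)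
      (fun z hz => hl z (List.mem_cons_of_mem x hz)) h'
    simpa [List.append_assoc] using this

lemma alt_char (positions : List Int) (hne : PySem.Set.ofList positions ≠ []) :
    ∃ b, lcrGood (PySem.Set.ofList positions) b ∧
      longest_contiguous_run_py_alt positions =
        some (b, b + lcrLen (PySem.Set.ofList positions) b) := by
  have hinv0 : lcrInvB (PySem.Set.ofList positions) [] none := by
    simp only [lcrInvB]
    intro y hy
    simp at hy
  have hinv := foldB_inv (PySem.Set.ofList positions) (PySem.Set.ofList positions) [] none
    (fun x hx => hx) hinv0
  simp only [List.nil_append] at hinv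
  unfold longest_contiguous_run_py_alt
  rw [if_neg hne]
  cases hacc : (PySem.Set.ofList positions).foldl (lcrStep (PySem.Set.ofList positions)) none with
  | none =>
    rw [hacc] at hinv
    simp only [lcrInvB] at hinv
    obtain ⟨m, hm⟩ := exists_start (PySem.Set.ofList positions) hne
    exact absurd hm (hinv m hm.1)
  | some p =>
    obtain ⟨b, bl⟩ := p
    rw [hacc] at hinv
    simp only [lcrInvB] at hinv
    obtain ⟨hbst, _, hbl, hdom⟩ := hinv
    refine ⟨b, ⟨hbst, fun x hx => hdom x hx.1 hx⟩, ?_⟩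
    rw [hbl]

lemma foldA_inv (s : List Int) : ∀ (rest : List Int) (bs be cs ce : Int),
    rest.Pairwise (· < ·) →
    (∀ z ∈ rest, z ∈ s) →
    (∀ z ∈ rest, ce ≤ z) →
    (∀ z, z ∈ s → z ∉ rest → z < ce) →
    (∀ k : Int, cs ≤ k → k < ce → k ∈ s) →
    lcrIsStart s cs → cs < ce →
    lcrIsStart s bs → bs ≤ cs → bs < be →
    ((bs = cs ∧ be ≤ ce) ∨ be = bs + lcrLen s bs) →
    (∀ x, lcrIsStart s x → x < cs →
      (lcrLen s x < be - bs ∨ (lcrLen s x = be - bs ∧ bs ≤ x))) →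
    ∃ b, lcrGood s b ∧ lcrAFinish (rest.foldl lcrAStep (bs, be, cs, ce)) = (b, b + lcrLen s b) := by
  intro rest
  induction rest with
  | nil =>
    intro bs be cs ce _ _ _ hproc hrun hcs hcslt hbs hbscs hbsbe hdis hdom
    have hce : ce ∉ s := fun h => by have := hproc ce h (by simp); omega
    have hlcs : lcrLen s cs = ce - cs := lcrLen_run s cs ce hrun hce hcslt
    have hnostart : ∀ x, lcrIsStart s x → x < cs ∨ x = cs := by
      intro x hx
      have hxlt : x < ce := hproc x hx.1 (by simp)
      by_cases hxc : x < cs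
      · exact Or.inl hxc
      · refine Or.inr ?_
        by_contra hne
        exact hx.2 (hrun (x - 1) (by omega) (by omega))
    simp only [List.foldl_nil, lcrAFinish]
    split_ifs with hgt
    · refine ⟨cs, ⟨hcs, fun x hx => ?_⟩, ?_⟩
      · rcases hnostart x hx with h | h
        · have := hdom x hx h
          omega
        · subst h; exact Or.inr ⟨rfl, le_refl x⟩
      · have hend : ce = cs + lcrLen s cs := by omega
        rw [hend]
    · have hbe : be = bs + lcrLen s bs := by
        rcases hdis with ⟨h1, h2⟩ | h2
        · subst h1; omega
        · exact h2
      refine ⟨bs, ⟨hbs, fun x hx => ?_⟩, ?_⟩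
      · rcases hnostart x hx with h | h
        · have := hdom x hx h
          omega
        · subst h
          omega
      · rw [hbe]
  | cons p rest ih =>
    intro bs be cs ce hsorted hrmem hge hproc hrun hcs hcslt hbs hbscs hbsbe hdis hdom
    obtain ⟨hplt, hsorted'⟩ := List.pairwise_cons.1 hsorted
    have hp_s : p ∈ s := hrmem p List.mem_cons_self
    have hpge : ce ≤ p := hge p List.mem_cons_self
    have hrmem' : ∀ z ∈ rest, z ∈ s := fun z hz => hrmem z (List.mem_cons_of_mem p hz)
    have hge' : ∀ z ∈ rest, p + 1 ≤ z := fun z hz => by have := hplt z hz; omega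
    have hproc' : ∀ z, z ∈ s → z ∉ rest → z < p + 1 := by
      intro z hz hznr
      by_cases hzp : z = p
      · omega
      · have : z ∉ p :: rest := by
          intro hm
          rcases List.mem_cons.1 hm with h | h
          · exact hzp h
          · exact hznr h
        have := hproc z hz this
        omega
    rw [List.foldl_cons]
    by_cases hpe : p = ce
    · have hstep : lcrAStep (bs, be, cs, ce) p = (bs, be, cs, p + 1) := by
        unfold lcrAStep
        rw [if_pos hpe]
      rw [hstep]
      refine ih bs be cs (p + 1) hsorted' hrmem' hge' hproc'
        (fun k hk1 hk2 => ?_) hcs (by omega) hbs hbscs hbsbe ?_ hdom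
      · by_cases hkc : k < ce
        · exact hrun k hk1 hkc
        · have : k = p := by omega
          subst this; exact hp_s
      · rcases hdis with ⟨h1, h2⟩ | h2
        · exact Or.inl ⟨h1, by omega⟩
        · exact Or.inr h2
    · have hplt_ce : ce < p := by omega
      have hce_not : ce ∉ s := by
        intro h
        have hnr : ce ∉ p :: rest := by
          intro hm
          rcases List.mem_cons.1 hm with h' | h'
          · omega
          · have := hplt _ h'; omega
        have := hproc ce h hnr
        omega
      have hlcs : lcrLen s cs = ce - cs := lcrLen_run s cs ce hrun hce_not hcslt
      have hpstart : lcrIsStart s p := by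
        refine ⟨hp_s, fun h => ?_⟩
        have hnr : p - 1 ∉ p :: rest := by
          intro hm
          rcases List.mem_cons.1 hm with h' | h'
          · omega
          · have := hplt _ h'; omega
        have := hproc (p - 1) h hnr
        omega
      have hnostart : ∀ x, lcrIsStart s x → x < p → x < cs ∨ x = cs := by
        intro x hx hxp
        have hxlt : x < ce := by
          by_contra hcon
          have hnr : x ∉ p :: rest := by
            intro hm
            rcases List.mem_cons.1 hm with h' | h'
            · omega
            · have := hplt _ h'; omega
          have := hproc x hx.1 hnr
          omega
        by_cases hxc : x < cs
        · exact Or.inl hxc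
        · refine Or.inr ?_
          by_contra hne
          exact hx.2 (hrun (x - 1) (by omega) (by omega))
      have hrun' : ∀ k : Int, p ≤ k → k < p + 1 → k ∈ s := by
        intro k h1 h2
        have : k = p := by omega
        subst this; exact hp_s
      by_cases hgt : ce - cs > be - bs
      · have hstep : lcrAStep (bs, be, cs, ce) p = (cs, ce, p, p + 1) := by
          unfold lcrAStep
          rw [if_neg hpe, if_pos hgt]
        rw [hstep]
        refine ih cs ce p (p + 1) hsorted' hrmem' hge' hproc' hrun'
          hpstart (by omega) hcs (by omega) (by omega) (Or.inr (by omega)) ?_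
        intro x hx hxp
        rcases hnostart x hx hxp with h | h
        · have := hdom x hx h
          omega
        · subst h
          omega
      · have hstep : lcrAStep (bs, be, cs, ce) p = (bs, be, p, p + 1) := by
          unfold lcrAStep
          rw [if_neg hpe, if_neg hgt]
        rw [hstep]
        have hbe : be = bs + lcrLen s bs := by
          rcases hdis with ⟨h1, h2⟩ | h2
          · subst h1; omega
          · exact h2
        refine ih bs be p (p + 1) hsorted' hrmem' hge' hproc' hrun'
          hpstart (by omega) hbs (by omega) hbsbe (Or.inr hbe) ?_
        intro x hx hxp
        rcases hnostart x hx hxp with h | h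
        · exact hdom x hx h
        · subst h
          omega

lemma a_char (positions : List Int) (hne : positions ≠ []) :
    ∃ b, lcrGood (PySem.Set.ofList positions) b ∧
      longest_contiguous_run_py positions =
        some (b, b + lcrLen (PySem.Set.ofList positions) b) := by
  have hpair := PySem.List.sorted_ofList_pairwise_lt (xs := positions)
  have hmemL : ∀ z : Int,
      z ∈ PySem.List.sorted (PySem.Set.ofList positions) (fun x => x) false ↔
        z ∈ PySem.Set.ofList positions := fun z => PySem.List.mem_sorted _ _ _ _
  cases hL : PySem.List.sorted (PySem.Set.ofList positions) (fun x => x) false with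
  | nil =>
    exfalso
    have := (PySem.List.sorted_eq_nil_iff _ _ _).1 hL
    rcases positions with _ | ⟨p, ps⟩
    · exact hne rfl
    · have hp : p ∈ PySem.Set.ofList (p :: ps) := by
        rw [PySem.Set.mem_ofList]; exact List.mem_cons_self
      rw [this] at hp
      exact (List.not_mem_nil) hp
  | cons h t =>
    rw [hL] at hpair hmemL
    obtain ⟨hplt, hpair'⟩ := List.pairwise_cons.1 hpair
    have hmem : ∀ z : Int, z ∈ PySem.Set.ofList positions ↔ z = h ∨ z ∈ t := by
      intro z
      rw [← hmemL z]
      simp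
    have hh : h ∈ PySem.Set.ofList positions := (hmem h).2 (Or.inl rfl)
    obtain ⟨b, hgood, hfin⟩ := foldA_inv (PySem.Set.ofList positions) t h (h + 1) h (h + 1)
      hpair'
      (fun z hz => (hmem z).2 (Or.inr hz))
      (fun z hz => by have := hplt z hz; omega)
      (fun z hz hznt => by
        rcases (hmem z).1 hz with h' | h'
        · omega
        · exact absurd h' hznt)
      (fun k hk1 hk2 => by
        have : k = h := by omega
        subst this; exact hh)
      (⟨hh, fun hc => by
        rcases (hmem (h - 1)).1 hc with h' | h'
        · omega
        · have := hplt _ h'; omega⟩)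
      (by omega) (⟨hh, fun hc => by
        rcases (hmem (h - 1)).1 hc with h' | h'
        · omega
        · have := hplt _ h'; omega⟩)
      (le_refl h) (by omega)
      (Or.inl ⟨rfl, le_refl (h + 1)⟩)
      (fun x hx hxlt => by
        rcases (hmem x).1 hx.1 with h' | h'
        · omega
        · have := hplt _ h'; omega)
    refine ⟨b, hgood, ?_⟩
    unfold longest_contiguous_run_py
    rw [if_neg hne, hL]
    simp only []
    rw [hfin]

-- ===== VERDICT (by name: the statement is the Claim_ definition above) =====
theorem longest_contiguous_run_py_spec : Claim_equal_longest_contiguous_run_py := by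
  intro positions _
  unfold Spec_longest_contiguous_run_py
  by_cases hpos : positions = []
  · subst hpos; rfl
  · have hs : PySem.Set.ofList positions ≠ [] := by
      intro h
      rcases positions with _ | ⟨p, ps⟩
      · exact hpos rfl
      · have : p ∈ PySem.Set.ofList (p :: ps) := by
          rw [PySem.Set.mem_ofList]; exact List.mem_cons_self
        rw [h] at this; exact (List.not_mem_nil) this
    obtain ⟨a, hga, hae⟩ := a_char positions hpos
    obtain ⟨b, hgb, hbe⟩ := alt_char positions hs
    have : a = b := lcrGood_unique _ a b hga hgb
    subst this
    rw [hae, hbe]
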